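-- pv_equiv track=rewrite | github.com/nkushalnagar/Quant-Project | proj3_complete.py | build_groups_from_mapping
-- ===== SOURCE A (Python) =====
-- def build_groups_from_mapping(mapping):
--     """
--     Construct follower clusters by connecting followers that share any leader.
--     Returns dict: follower -> group_id
--     """
--     from collections import defaultdict
--
--     # Build leader -> followers mapping
--     leader_to_followers = defaultdict(set)
--     for fol, pairs in mapping.items():
--         for ldr, _ in pairs:
--             leader_to_followers[ldr].add(fol)
--
--     # Find connected components (followers that share leaders)
--     visited = set()
--     groups = {}
--     group_id = 0
--
--     def dfs(fol, current_group):
--         if fol in visited: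
--             return
--         visited.add(fol)
--         groups[fol] = current_group
--         # Find all followers connected through shared leaders
--         if fol in mapping:
--             for ldr, _ in mapping[fol]:
--                 for connected_fol in leader_to_followers[ldr]:
--                     if connected_fol != fol:
--                         dfs(connected_fol, current_group)
--
--     for fol in mapping.keys():
--         if fol not in visited:
--             dfs(fol, group_id)
--             group_id += 1
--
--     return groups
-- ===== SOURCE B (Python) =====
-- def build_groups_from_mapping(mapping):
--     """
--     Construct follower clusters by connecting followers that share any leader.
--     Returns dict: follower -> group_id
--     """
--     from collections import deque
--
--     # leader -> list of the followers having that leader (first-appearance order,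
--     # kept duplicate-free by a membership test before appending)
--     leader_to_followers = {}
--     for fol, pairs in mapping.items():
--         for ldr, _ in pairs:
--             lst = leader_to_followers.get(ldr, [])
--             if fol not in lst:
--                 lst.append(fol)
--                 leader_to_followers[ldr] = lst
--
--     groups = {}          # doubles as the visited set
--     group_id = 0
--     for start in mapping:
--         if start in groups:
--             continue
--         worklist = deque([start])
--         while worklist:
--             fol = worklist.popleft()
--             if fol in groups:
--                 continue
--             groups[fol] = group_id
--             worklist.extendleft(reversed([cf for ldr, _ in mapping.get(fol, ())
--                                           for cf in leader_to_followers[ldr] if cf != fol]))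
--         group_id += 1
--     return groups
-- ===== Notes on version B (the rewrite author's own statement) =====
-- stated objective: alternative
-- what changed: replaces A's recursive shared-leader DFS (defaultdict of sets + nested recursive calls and a separate visited set) by an iterative worklist loop over a plain leader->follower-list dict: neighbours come from one list comprehension prepended to the worklist, and the result dict itself serves as the visited set, so there is no recursion, no set objects and no separate visited structure
import Mathlib
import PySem

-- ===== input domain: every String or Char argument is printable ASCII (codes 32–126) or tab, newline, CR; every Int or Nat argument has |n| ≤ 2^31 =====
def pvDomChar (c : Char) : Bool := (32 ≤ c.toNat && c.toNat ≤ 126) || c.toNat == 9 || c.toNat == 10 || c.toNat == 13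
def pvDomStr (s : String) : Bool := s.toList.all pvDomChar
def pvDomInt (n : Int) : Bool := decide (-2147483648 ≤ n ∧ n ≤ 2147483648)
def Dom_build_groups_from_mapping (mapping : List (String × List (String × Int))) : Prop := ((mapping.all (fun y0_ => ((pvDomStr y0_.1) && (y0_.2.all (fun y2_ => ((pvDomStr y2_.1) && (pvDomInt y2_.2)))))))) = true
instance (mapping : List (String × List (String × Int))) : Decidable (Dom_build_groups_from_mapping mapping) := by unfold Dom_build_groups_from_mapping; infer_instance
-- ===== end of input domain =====

-- B replaces A's recursive shared-leader DFS (sets + recursion + separate visited set) by an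
-- iterative worklist loop over a plain leader→follower-list dict in which the result dict
-- itself is the visited set; same return value (neither version mutates its argument).
-- A's Python iterates Python sets (hash order); that order only affects the insertion order of
-- the returned dict (never its content); dict outputs are compared ignoring order, and both
-- ports model set iteration in insertion order.

abbrev PvSt := PySem.Set String × PySem.Dict String Int

-- ===== PORT A =====
-- leader -> set of followers (defaultdict(set) loop)
def pvLtfA (md : PySem.Dict String (List (String × Int))) : PySem.Dict String (PySem.Set String) :=
  md.items.foldl (fun d p =>
    p.2.foldl (fun d q => PySem.Dict.modify d q.1 [] (fun s => PySem.Set.add s p.1)) d)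
    PySem.Dict.empty

-- the recursive dfs; fuel is a port artifact (the Python recursion terminates because
-- `visited` grows), mapping.size + 1 is always enough (proved below)
def pvDfsA (md : PySem.Dict String (List (String × Int)))
    (ltf : PySem.Dict String (PySem.Set String)) :
    Nat → Int → String → PvSt → PvSt
  | 0, _, _, st => st
  | fuel+1, g, fol, st =>
    if PySem.Set.contains st.1 fol then st
    else
      let st1 : PvSt := (PySem.Set.add st.1 fol, PySem.Dict.insert st.2 fol g)
      if PySem.Dict.contains md fol then
        (PySem.Dict.getD md fol []).foldl (fun st p =>
          (PySem.Dict.getD ltf p.1 []).foldl (fun st cf =>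
            if cf ≠ fol then pvDfsA md ltf fuel g cf st else st) st) st1
      else st1

def build_groups_from_mapping (mapping : List (String × List (String × Int))) : List (String × Int) :=
  let md := PySem.Dict.ofList mapping
  let ltf := pvLtfA md
  let res := md.keys.foldl (fun (st : PvSt × Int) fol =>
      if PySem.Set.contains st.1.1 fol then st
      else (pvDfsA md ltf (PySem.Dict.size md + 1) st.2 fol st.1, st.2 + 1))
    ((PySem.Set.empty, PySem.Dict.empty), 0)
  res.1.2.items

-- ===== PORT B =====
-- leader -> list of the followers having that leader, kept duplicate-free by a
-- membership test before appending
def pvLtfB (md : PySem.Dict String (List (String × Int))) : PySem.Dict String (List String) :=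
  md.items.foldl (fun d p =>
    p.2.foldl (fun d q =>
      let lst := PySem.Dict.getD d q.1 []
      if p.1 ∈ lst then d else PySem.Dict.insert d q.1 (lst ++ [p.1])) d)
    PySem.Dict.empty

-- the while-worklist loop; Python's `worklist.pop(0)` with the comprehension prepended is
-- exactly head-first consumption with `nbrs ++ rest` pending.  `groups` doubles as the
-- visited set (`fol in groups`).  fuel is a port artifact (bounded below).
def pvLoopB (md : PySem.Dict String (List (String × Int)))
    (ltf : PySem.Dict String (List String)) :
    Nat → Int → List String → PySem.Dict String Int → PySem.Dict String Int
  | _, _, [], grp => grp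
  | 0, _, _ :: _, grp => grp
  | fuel+1, g, fol :: rest, grp =>
    if PySem.Dict.contains grp fol then pvLoopB md ltf fuel g rest grp
    else
      pvLoopB md ltf fuel g
        (((PySem.Dict.getD md fol []).flatMap (fun q =>
            (PySem.Dict.getD ltf q.1 []).filter (fun cf => cf ≠ fol))) ++ rest)
        (PySem.Dict.insert grp fol g)

def build_groups_from_mapping_alt (mapping : List (String × List (String × Int))) : List (String × Int) :=
  let md := PySem.Dict.ofList mapping
  let ltf := pvLtfB md
  let fuel := 1 + PySem.Dict.size md +
    md.items.foldl (fun n p => n + p.2.length * PySem.Dict.size md) 0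
  let res := md.keys.foldl (fun (acc : PySem.Dict String Int × Int) start =>
      if PySem.Dict.contains acc.1 start then acc
      else (pvLoopB md ltf fuel acc.2 [start] acc.1, acc.2 + 1))
    (PySem.Dict.empty, 0)
  res.1.items

-- ===== PRECONDITION & SPEC =====
def Spec_build_groups_from_mapping (mapping : List (String × List (String × Int))) (out : List (String × Int)) : Prop := out = build_groups_from_mapping_alt mapping
instance (mapping : List (String × List (String × Int))) (out : List (String × Int)) : Decidable (Spec_build_groups_from_mapping mapping out) := by unfold Spec_build_groups_from_mapping; infer_instance

-- ===== CLAIM (what is proved, stated in full; the proofs are below) =====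
def Claim_equal_build_groups_from_mapping : Prop := ∀ (mapping : List (String × List (String × Int))), Dom_build_groups_from_mapping mapping → Spec_build_groups_from_mapping mapping (build_groups_from_mapping mapping)

-- ===== LEMMAS AND PROOFS =====

lemma pvNotTrue (b : Bool) (h : ¬ b = true) : b = false := by
  cases b
  · rfl
  · exact absurd rfl h

-- small bridges between PySem.Set.contains and membership
lemma pvContains_iff (s : PySem.Set String) (x : String) :
    PySem.Set.contains s x = true ↔ x ∈ s := by
  simp [PySem.Set.contains]

lemma pvContains_false (s : PySem.Set String) (x : String) :
    PySem.Set.contains s x = false ↔ x ∉ s := by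
  rw [← Bool.not_eq_true, not_iff_not]
  exact pvContains_iff s x

lemma pvAddEq (s : PySem.Set String) (x : String) (h : PySem.Set.contains s x = false) :
    PySem.Set.add s x = s ++ [x] := by
  have hx : x ∉ s := (pvContains_false s x).1 h
  simp [PySem.Set.add, hx]

lemma pvAddMem (s : PySem.Set String) (x : String) (h : PySem.Set.contains s x = true) :
    PySem.Set.add s x = s := by
  have hx : x ∈ s := (pvContains_iff s x).1 h
  simp [PySem.Set.add, hx]

lemma pvContainsAdd (s : PySem.Set String) (f x : String) :
    PySem.Set.contains (PySem.Set.add s f) x = (x == f || PySem.Set.contains s x) := by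
  by_cases hx : x ∈ PySem.Set.add s f
  · rw [(pvContains_iff _ _).2 hx]
    rcases (PySem.Set.mem_add _ _ _).1 hx with h | h
    · rw [(pvContains_iff _ _).2 h, Bool.or_true]
    · simp [h]
  · rw [pvNotTrue _ (fun h => hx ((pvContains_iff _ _).1 h))]
    have hxs : x ∉ s := fun h => hx ((PySem.Set.mem_add _ _ _).2 (Or.inl h))
    have hxf : x ≠ f := fun h => hx ((PySem.Set.mem_add _ _ _).2 (Or.inr h))
    rw [pvNotTrue _ (fun h => hxs ((pvContains_iff _ _).1 h))]
    simp [hxf]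

-- the (ordered) list of followers connected to fol through a shared leader, as both
-- programs enumerate it
def pvNbrs (md : PySem.Dict String (List (String × Int)))
    (ltf : PySem.Dict String (List String)) (fol : String) : List String :=
  (PySem.Dict.getD md fol []).flatMap (fun p =>
    (PySem.Dict.getD ltf p.1 []).filter (fun cf => cf ≠ fol))

-- number of keys not yet visited (termination measure of A's dfs)
def pvM (U vis : List String) : Nat := (U.filter (fun k => !vis.contains k)).length

-- upper bound on the iterations left in the worklist loop
def pvBnd (md : PySem.Dict String (List (String × Int)))
    (ltf : PySem.Dict String (List String)) (vis stack : List String) : Nat :=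
  stack.length +
    ((md.keys.filter (fun k => !vis.contains k)).map (fun k => 1 + (pvNbrs md ltf k).length)).sum

-- the fuel constant written into port B
def pvFuel (md : PySem.Dict String (List (String × Int))) : Nat :=
  1 + PySem.Dict.size md +
    md.items.foldl (fun n p => n + p.2.length * PySem.Dict.size md) 0

-- combined view of B's loop carrying A's paired state (visited set alongside the dict);
-- used only by the proofs
def pvC (md : PySem.Dict String (List (String × Int)))
    (ltf : PySem.Dict String (List String)) :
    Nat → Int → List String → PvSt → PvSt
  | _, _, [], st => st
  | 0, _, _ :: _, st => st
  | fuel+1, g, fol :: rest, st =>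
    if PySem.Set.contains st.1 fol then pvC md ltf fuel g rest st
    else pvC md ltf fuel g (pvNbrs md ltf fol ++ rest)
      (PySem.Set.add st.1 fol, PySem.Dict.insert st.2 fol g)

-- canonical (fuel-free) views of the two loops
def pvDFS (md : PySem.Dict String (List (String × Int)))
    (ltf : PySem.Dict String (PySem.Set String)) (g : Int) (fol : String) (st : PvSt) : PvSt :=
  pvDfsA md ltf (pvM md.keys st.1 + 1) g fol st

def pvRUN (md : PySem.Dict String (List (String × Int)))
    (ltf : PySem.Dict String (List String)) (g : Int) (stack : List String) (st : PvSt) : PvSt :=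
  pvC md ltf (pvBnd md ltf st.1 stack) g stack st

-- the invariant tying B's groups-as-visited dict to A's paired state
def pvInv (st : PvSt) : Prop :=
  ∀ x, PySem.Dict.contains st.2 x = PySem.Set.contains st.1 x

lemma pvDfsA_succ (md : PySem.Dict String (List (String × Int)))
    (ltf : PySem.Dict String (PySem.Set String)) (fuel : Nat) (g : Int) (fol : String) (st : PvSt) :
    pvDfsA md ltf (fuel+1) g fol st =
      if PySem.Set.contains st.1 fol then st
      else ((PySem.Dict.getD md fol []).flatMap (fun p =>
          (PySem.Dict.getD ltf p.1 []).filter (fun cf => cf ≠ fol))).foldl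
        (fun st cf => pvDfsA md ltf fuel g cf st)
        (PySem.Set.add st.1 fol, PySem.Dict.insert st.2 fol g) := by
  simp only [pvDfsA]
  by_cases hv : PySem.Set.contains st.1 fol
  · rw [if_pos hv, if_pos hv]
  · rw [if_neg hv, if_neg hv]
    by_cases hc : PySem.Dict.contains md fol
    · rw [if_pos hc]
      rw [List.foldl_flatMap]
      refine PySem.List.foldl_congr_mem (PySem.Dict.getD md fol []) _ _ _ ?_
      intro acc p _
      exact PySem.List.foldl_ite_eq_foldl_filter (fun cf => cf ≠ fol)
        (fun st cf => pvDfsA md ltf fuel g cf st) (PySem.Dict.getD ltf p.1 []) acc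
    · rw [if_neg hc]
      simp [PySem.Dict.getD_of_not_contains (d := md) (d0 := []) (pvNotTrue _ hc)]

lemma pvC_nil (md : PySem.Dict String (List (String × Int)))
    (ltf : PySem.Dict String (List String)) (fuel : Nat) (g : Int) (st : PvSt) :
    pvC md ltf fuel g [] st = st := by
  cases fuel <;> rfl

lemma pvC_cons (md : PySem.Dict String (List (String × Int)))
    (ltf : PySem.Dict String (List String)) (fuel : Nat) (g : Int) (fol : String)
    (rest : List String) (st : PvSt) :
    pvC md ltf (fuel+1) g (fol :: rest) st =
      if PySem.Set.contains st.1 fol then pvC md ltf fuel g rest st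
      else pvC md ltf fuel g (pvNbrs md ltf fol ++ rest)
        (PySem.Set.add st.1 fol, PySem.Dict.insert st.2 fol g) := rfl

-- membership in pvNbrs comes from ltf values
lemma pvNbrs_sub (md : PySem.Dict String (List (String × Int)))
    (ltf : PySem.Dict String (List String))
    (hltf : ∀ l x, x ∈ PySem.Dict.getD ltf l [] → x ∈ md.keys) :
    ∀ fol x, x ∈ pvNbrs md ltf fol → x ∈ md.keys := by
  intro fol x hx
  simp only [pvNbrs, List.mem_flatMap, List.mem_filter] at hx
  obtain ⟨p, _, hx, _⟩ := hx
  exact hltf p.1 x hx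

-- ltf-building: elements of any value of A's leader->followers dict come from earlier item keys
lemma pvLtfA_inner_mem (fol : String) (pairs : List (String × Int)) :
    ∀ (d : PySem.Dict String (PySem.Set String)) (l x : String),
      x ∈ PySem.Dict.getD (pairs.foldl (fun d q =>
        PySem.Dict.modify d q.1 [] (fun s => PySem.Set.add s fol)) d) l [] →
      x ∈ PySem.Dict.getD d l [] ∨ x = fol := by
  induction pairs with
  | nil => intro d l x hx; exact Or.inl hx
  | cons q qs ih =>
    intro d l x hx
    rw [List.foldl_cons] at hx
    rcases ih _ l x hx with h | h
    · rw [PySem.Dict.getD_modify] at h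
      by_cases hl : l = q.1
      · rw [if_pos hl] at h
        rcases (PySem.Set.mem_add _ _ _).1 h with h' | h'
        · subst hl; exact Or.inl h'
        · exact Or.inr h'
      · rw [if_neg hl] at h; exact Or.inl h
    · exact Or.inr h

lemma pvLtfA_inner_nodup (fol : String) (pairs : List (String × Int)) :
    ∀ (d : PySem.Dict String (PySem.Set String)),
      (∀ l, (PySem.Dict.getD d l []).Nodup) →
      ∀ l, (PySem.Dict.getD (pairs.foldl (fun d q =>
        PySem.Dict.modify d q.1 [] (fun s => PySem.Set.add s fol)) d) l []).Nodup := by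
  induction pairs with
  | nil => intro d hd l; exact hd l
  | cons q qs ih =>
    intro d hd l
    rw [List.foldl_cons]
    apply ih
    intro l'
    rw [PySem.Dict.getD_modify]
    by_cases hl : l' = q.1
    · rw [if_pos hl]; exact PySem.Set.nodup_add _ _ (hd q.1)
    · rw [if_neg hl]; exact hd l'

lemma pvLtfA_fold_mem (P : String → Prop) :
    ∀ (items : List (String × List (String × Int))) (d : PySem.Dict String (PySem.Set String)),
      (∀ l x, x ∈ PySem.Dict.getD d l [] → P x) → (∀ p ∈ items, P p.1) →
      ∀ l x, x ∈ PySem.Dict.getD (items.foldl (fun d p =>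
        p.2.foldl (fun d q => PySem.Dict.modify d q.1 [] (fun s => PySem.Set.add s p.1)) d) d) l [] →
      P x := by
  intro items
  induction items with
  | nil => intro d hd _ l x hx; exact hd l x hx
  | cons p ps ih =>
    intro d hd hps l x hx
    rw [List.foldl_cons] at hx
    refine ih _ ?_ (fun q hq => hps q (List.mem_cons_of_mem _ hq)) l x hx
    intro l' x' hx'
    rcases pvLtfA_inner_mem p.1 p.2 d l' x' hx' with h | h
    · exact hd l' x' h
    · exact h ▸ hps p List.mem_cons_self

lemma pvLtfA_val_mem (md : PySem.Dict String (List (String × Int))) :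
    ∀ l x, x ∈ PySem.Dict.getD (pvLtfA md) l [] → x ∈ md.keys := by
  intro l x hx
  refine pvLtfA_fold_mem (· ∈ md.keys) md.items PySem.Dict.empty ?_ ?_ l x hx
  · intro l' x' hx'
    rw [PySem.Dict.getD_empty] at hx'
    cases hx'
  · intro p hp
    simp only [PySem.Dict.keys]
    exact List.mem_map_of_mem hp

lemma pvLtfA_val_nodup (md : PySem.Dict String (List (String × Int))) :
    ∀ l, (PySem.Dict.getD (pvLtfA md) l []).Nodup := by
  suffices h : ∀ (items : List (String × List (String × Int)))
      (d : PySem.Dict String (PySem.Set String)),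
      (∀ l, (PySem.Dict.getD d l []).Nodup) →
      ∀ l, (PySem.Dict.getD (items.foldl (fun d p =>
        p.2.foldl (fun d q => PySem.Dict.modify d q.1 [] (fun s => PySem.Set.add s p.1)) d) d) l []).Nodup by
    intro l
    refine h md.items PySem.Dict.empty (fun l' => ?_) l
    rw [PySem.Dict.getD_empty]; exact List.nodup_nil
  intro items
  induction items with
  | nil => intro d hd l; exact hd l
  | cons p ps ih =>
    intro d hd l
    rw [List.foldl_cons]
    exact ih _ (pvLtfA_inner_nodup p.1 p.2 d hd) l

-- B's membership-append list building computes exactly the values of A's set building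
lemma pvLtfB_inner_eq (fol : String) (pairs : List (String × Int)) :
    ∀ (dA : PySem.Dict String (PySem.Set String)) (dB : PySem.Dict String (List String)),
      (∀ l, PySem.Dict.getD dB l [] = PySem.Dict.getD dA l []) →
      ∀ l, PySem.Dict.getD (pairs.foldl (fun d q =>
          let lst := PySem.Dict.getD d q.1 []
          if fol ∈ lst then d else PySem.Dict.insert d q.1 (lst ++ [fol])) dB) l [] =
        PySem.Dict.getD (pairs.foldl (fun d q =>
          PySem.Dict.modify d q.1 [] (fun s => PySem.Set.add s fol)) dA) l [] := by
  induction pairs with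
  | nil => intro dA dB h l; exact h l
  | cons q qs ih =>
    intro dA dB h l
    simp only [List.foldl_cons]
    refine ih _ _ ?_ l
    intro l'
    rw [PySem.Dict.getD_modify]
    by_cases hmem : fol ∈ PySem.Dict.getD dB q.1 []
    · rw [if_pos hmem]
      by_cases hl : l' = q.1
      · rw [if_pos hl, hl, h q.1, pvAddMem _ _ ((pvContains_iff _ _).2 (h q.1 ▸ hmem))]
      · rw [if_neg hl, h l']
    · rw [if_neg hmem]
      have hnm : fol ∉ PySem.Dict.getD dA q.1 [] := h q.1 ▸ hmem
      rw [PySem.Dict.getD_insert]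
      by_cases hl : l' = q.1
      · rw [if_pos hl, if_pos hl, h q.1, pvAddEq _ _ ((pvContains_false _ _).2 hnm)]
      · rw [if_neg hl, if_neg hl, h l']

lemma pvLtfB_eq (md : PySem.Dict String (List (String × Int))) :
    ∀ l, PySem.Dict.getD (pvLtfB md) l [] = PySem.Dict.getD (pvLtfA md) l [] := by
  unfold pvLtfB pvLtfA
  suffices h : ∀ (items : List (String × List (String × Int)))
      (dA : PySem.Dict String (PySem.Set String)) (dB : PySem.Dict String (List String)),
      (∀ l, PySem.Dict.getD dB l [] = PySem.Dict.getD dA l []) →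
      ∀ l, PySem.Dict.getD (items.foldl (fun d p =>
          p.2.foldl (fun d q =>
            let lst := PySem.Dict.getD d q.1 []
            if p.1 ∈ lst then d else PySem.Dict.insert d q.1 (lst ++ [p.1])) d) dB) l [] =
        PySem.Dict.getD (items.foldl (fun d p =>
          p.2.foldl (fun d q =>
            PySem.Dict.modify d q.1 [] (fun s => PySem.Set.add s p.1)) d) dA) l [] by
    exact h md.items PySem.Dict.empty PySem.Dict.empty (fun _ => rfl)
  intro items
  induction items with
  | nil => intro dA dB h l; exact h l
  | cons p ps ih =>
    intro dA dB h l
    simp only [List.foldl_cons]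
    exact ih _ _ (pvLtfB_inner_eq p.1 p.2 dA dB h) l

lemma pvM_append (U vis ex : List String) : pvM U (vis ++ ex) ≤ pvM U vis := by
  apply List.Sublist.length_le
  apply List.monotone_filter_right
  intro a ha
  simp only [Bool.not_eq_eq_eq_not, Bool.not_true, List.contains_eq_mem,
    decide_eq_false_iff_not, List.mem_append, not_or] at ha ⊢
  exact ha.1

lemma pvM_lt (U vis : List String) (fol : String) (hfol : fol ∈ U)
    (hnv : PySem.Set.contains vis fol = false) :
    pvM U (PySem.Set.add vis fol) < pvM U vis := by
  rw [pvAddEq _ _ hnv]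
  have hnv' : fol ∉ vis := (pvContains_false _ _).1 hnv
  induction U with
  | nil => cases hfol
  | cons a as ihU =>
    by_cases ha : a = fol
    · subst ha
      simp only [pvM, List.filter_cons]
      rw [if_neg (by simp [List.contains_eq_mem] :
            ¬ ((!(vis ++ [a]).contains a) = true)),
          if_pos (show (!vis.contains a) = true by simp [List.contains_eq_mem, hnv'])]
      calc ((as.filter (fun k => !(vis ++ [a]).contains k)).length)
          ≤ (as.filter (fun k => !vis.contains k)).length := by
            apply List.Sublist.length_le
            apply List.monotone_filter_right
            intro x hx
            simp only [Bool.not_eq_eq_eq_not, Bool.not_true, List.contains_eq_mem,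
              decide_eq_false_iff_not, List.mem_append, not_or] at hx ⊢
            exact hx.1
        _ < (as.filter (fun k => !vis.contains k)).length + 1 := Nat.lt_succ_self _
    · have hfol' : fol ∈ as := by
        rcases List.mem_cons.1 hfol with h | h
        · exact absurd h.symm ha
        · exact h
      have hsame : ((vis ++ [fol]).contains a) = (vis.contains a) := by
        simp [List.contains_eq_mem, ha]
      have ih := ihU hfol'
      unfold pvM at ih ⊢
      rw [List.filter_cons, List.filter_cons, hsame]
      cases h : (!vis.contains a)
      · rw [if_neg Bool.false_ne_true, if_neg Bool.false_ne_true]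
        exact ih
      · rw [if_pos rfl, if_pos rfl]
        simp only [List.length_cons]
        omega

lemma pvM_le_len (U vis : List String) : pvM U vis ≤ U.length :=
  List.length_filter_le _ _

-- visited only grows along A's dfs, by elements of md.keys
lemma pvDfsA_mono (md : PySem.Dict String (List (String × Int)))
    (ltf : PySem.Dict String (PySem.Set String))
    (hltf : ∀ l x, x ∈ PySem.Dict.getD ltf l [] → x ∈ md.keys) :
    ∀ (fuel : Nat) (g : Int) (fol : String) (st : PvSt), fol ∈ md.keys →
      ∃ ex, (pvDfsA md ltf fuel g fol st).1 = st.1 ++ ex ∧ ∀ x ∈ ex, x ∈ md.keys := by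
  intro fuel
  induction fuel with
  | zero =>
    intro g fol st _
    exact ⟨[], by simp [pvDfsA], by simp⟩
  | succ n ih =>
    intro g fol st hfol
    rw [pvDfsA_succ]
    by_cases hv : PySem.Set.contains st.1 fol
    · rw [if_pos hv]
      exact ⟨[], by simp, by simp⟩
    · rw [if_neg hv]
      have hfold : ∀ (l : List String), (∀ x ∈ l, x ∈ md.keys) → ∀ st' : PvSt,
          ∃ ex, (l.foldl (fun st cf => pvDfsA md ltf n g cf st) st').1 = st'.1 ++ ex ∧
            ∀ x ∈ ex, x ∈ md.keys := by
        intro l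
        induction l with
        | nil => intro _ st'; exact ⟨[], by simp, by simp⟩
        | cons c cs ihl =>
          intro hl st'
          obtain ⟨ex1, h1, h1m⟩ := ih g c st' (hl c (by simp))
          obtain ⟨ex2, h2, h2m⟩ := ihl (fun x hx => hl x (by simp [hx]))
            (pvDfsA md ltf n g c st')
          refine ⟨ex1 ++ ex2, ?_, ?_⟩
          · rw [List.foldl_cons, h2, h1, List.append_assoc]
          · intro x hx
            rcases List.mem_append.1 hx with h | h
            · exact h1m x h
            · exact h2m x h
      have hsub : ∀ x ∈ (PySem.Dict.getD md fol []).flatMap (fun p =>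
          (PySem.Dict.getD ltf p.1 []).filter (fun cf => cf ≠ fol)), x ∈ md.keys := by
        intro x hx
        simp only [List.mem_flatMap, List.mem_filter] at hx
        obtain ⟨p, _, hx, _⟩ := hx
        exact hltf p.1 x hx
      obtain ⟨ex, hex, hexm⟩ := hfold _ hsub
        (PySem.Set.add st.1 fol, PySem.Dict.insert st.2 fol g)
      refine ⟨[fol] ++ ex, ?_, ?_⟩
      · rw [hex]
        show PySem.Set.add st.1 fol ++ ex = st.1 ++ ([fol] ++ ex)
        rw [pvAddEq _ _ (pvNotTrue _ hv), List.append_assoc]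
      · intro x hx
        rcases List.mem_append.1 hx with h | h
        · rw [List.mem_singleton.1 h]; exact hfol
        · exact hexm x h

-- fuel irrelevance of A's dfs above the measure
lemma pvDfsA_suff (md : PySem.Dict String (List (String × Int)))
    (ltf : PySem.Dict String (PySem.Set String))
    (hltf : ∀ l x, x ∈ PySem.Dict.getD ltf l [] → x ∈ md.keys) :
    ∀ (n : Nat) (st : PvSt) (g : Int) (fol : String) (fuel₁ fuel₂ : Nat), fol ∈ md.keys →
      pvM md.keys st.1 ≤ n → n < fuel₁ → n < fuel₂ →
      pvDfsA md ltf fuel₁ g fol st = pvDfsA md ltf fuel₂ g fol st := by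
  intro n
  induction n using Nat.strong_induction_on with
  | _ n ihn =>
  intro st g fol fuel₁ fuel₂ hfol hm h1 h2
  obtain ⟨f1, rfl⟩ : ∃ f, fuel₁ = f + 1 := ⟨fuel₁ - 1, by omega⟩
  obtain ⟨f2, rfl⟩ : ∃ f, fuel₂ = f + 1 := ⟨fuel₂ - 1, by omega⟩
  rw [pvDfsA_succ, pvDfsA_succ]
  by_cases hv : PySem.Set.contains st.1 fol
  · rw [if_pos hv, if_pos hv]
  · rw [if_neg hv, if_neg hv]
    have hv' : PySem.Set.contains st.1 fol = false := by
      cases h : PySem.Set.contains st.1 fol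
      · rfl
      · exact absurd h hv
    have hlt : pvM md.keys (PySem.Set.add st.1 fol) < pvM md.keys st.1 :=
      pvM_lt md.keys st.1 fol hfol hv'
    have hm1 : pvM md.keys (PySem.Set.add st.1 fol) ≤ n - 1 := by omega
    have hn1 : n - 1 < n := by omega
    have hfold : ∀ (l : List String), (∀ x ∈ l, x ∈ md.keys) → ∀ st' : PvSt,
        pvM md.keys st'.1 ≤ n - 1 →
        l.foldl (fun st cf => pvDfsA md ltf f1 g cf st) st' =
          l.foldl (fun st cf => pvDfsA md ltf f2 g cf st) st' := by
      intro l
      induction l with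
      | nil => intro _ _ _; rfl
      | cons c cs ihl =>
        intro hl st' hm'
        simp only [List.foldl_cons]
        rw [ihn (n-1) hn1 st' g c f1 f2 (hl c (by simp)) hm' (by omega) (by omega)]
        apply ihl (fun x hx => hl x (by simp [hx]))
        obtain ⟨ex, hex, _⟩ := pvDfsA_mono md ltf hltf f2 g c st' (hl c (by simp))
        calc pvM md.keys (pvDfsA md ltf f2 g c st').1
            = pvM md.keys (st'.1 ++ ex) := by rw [hex]
          _ ≤ pvM md.keys st'.1 := pvM_append _ _ _
          _ ≤ n - 1 := hm'
    refine hfold _ ?_ (PySem.Set.add st.1 fol, PySem.Dict.insert st.2 fol g) hm1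
    intro x hx
    simp only [List.mem_flatMap, List.mem_filter] at hx
    obtain ⟨p, _, hx, _⟩ := hx
    exact hltf p.1 x hx

lemma pvDfsA_eq_DFS (md : PySem.Dict String (List (String × Int)))
    (ltf : PySem.Dict String (PySem.Set String))
    (hltf : ∀ l x, x ∈ PySem.Dict.getD ltf l [] → x ∈ md.keys)
    (fuel : Nat) (g : Int) (fol : String) (st : PvSt) (hfol : fol ∈ md.keys)
    (h : pvM md.keys st.1 < fuel) :
    pvDfsA md ltf fuel g fol st = pvDFS md ltf g fol st :=
  pvDfsA_suff md ltf hltf (pvM md.keys st.1) st g fol fuel _ hfol le_rfl h (Nat.lt_succ_self _)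

lemma pvSum_remove (w : String → Nat) (vis : List String) (fol : String) :
    ∀ (U : List String), U.Nodup → fol ∈ U → vis.contains fol = false →
    ((U.filter (fun k => !(vis ++ [fol]).contains k)).map w).sum + w fol =
      ((U.filter (fun k => !vis.contains k)).map w).sum := by
  intro U
  induction U with
  | nil => intro _ h; cases h
  | cons a as ihU =>
    intro hnd hfol hnv
    rw [List.nodup_cons] at hnd
    by_cases ha : a = fol
    · subst ha
      rw [List.filter_cons, List.filter_cons,
        if_neg (by simp [List.contains_eq_mem] : ¬ ((!(vis ++ [a]).contains a) = true)),
        if_pos (show (!vis.contains a) = true by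
          simpa [List.contains_eq_mem] using (pvContains_false vis a).1 hnv)]
      have heq : as.filter (fun k => !(vis ++ [a]).contains k) =
          as.filter (fun k => !vis.contains k) := by
        apply List.filter_congr
        intro x hx
        have hxa : x ≠ a := fun h => hnd.1 (h ▸ hx)
        simp [List.contains_eq_mem, hxa]
      rw [heq, List.map_cons, List.sum_cons]
      omega
    · have hfol' : fol ∈ as := by
        rcases List.mem_cons.1 hfol with h | h
        · exact absurd h.symm ha
        · exact h
      have hsame : ((vis ++ [fol]).contains a) = (vis.contains a) := by
        simp [List.contains_eq_mem, ha]
      have ih := ihU hnd.2 hfol' hnv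
      rw [List.filter_cons, List.filter_cons, hsame]
      cases h : (!vis.contains a)
      · rw [if_neg Bool.false_ne_true, if_neg Bool.false_ne_true]
        exact ih
      · rw [if_pos rfl, if_pos rfl, List.map_cons, List.sum_cons, List.map_cons, List.sum_cons]
        omega

lemma pvBnd_mark (md : PySem.Dict String (List (String × Int)))
    (ltf : PySem.Dict String (List String)) (hU : md.keys.Nodup) (vis : List String)
    (fol : String) (hfol : fol ∈ md.keys) (hnv : PySem.Set.contains vis fol = false)
    (rest : List String) :
    pvBnd md ltf (PySem.Set.add vis fol) (pvNbrs md ltf fol ++ rest) + 2 ≤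
      pvBnd md ltf vis (fol :: rest) := by
  rw [pvAddEq _ _ hnv]
  unfold pvBnd
  have h := pvSum_remove (fun k => 1 + (pvNbrs md ltf k).length) vis fol md.keys hU hfol hnv
  simp only [] at h
  simp only [List.length_append, List.length_cons]
  omega

-- fuel irrelevance of the combined loop above the bound
lemma pvC_suff (md : PySem.Dict String (List (String × Int)))
    (ltf : PySem.Dict String (List String))
    (hltf : ∀ l x, x ∈ PySem.Dict.getD ltf l [] → x ∈ md.keys) (hU : md.keys.Nodup) :
    ∀ (n : Nat) (stack : List String) (st : PvSt) (g : Int) (fuel₁ fuel₂ : Nat),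
      (∀ x ∈ stack, x ∈ md.keys) → pvBnd md ltf st.1 stack ≤ n → n ≤ fuel₁ → n ≤ fuel₂ →
      pvC md ltf fuel₁ g stack st = pvC md ltf fuel₂ g stack st := by
  intro n
  induction n using Nat.strong_induction_on with
  | _ n ihn =>
  intro stack st g fuel₁ fuel₂ hstk hb h1 h2
  cases stack with
  | nil => rw [pvC_nil, pvC_nil]
  | cons fol rest =>
    have hge1 : 1 ≤ pvBnd md ltf st.1 (fol :: rest) := by
      unfold pvBnd
      simp only [List.length_cons]
      omega
    obtain ⟨f1, rfl⟩ : ∃ f, fuel₁ = f + 1 := ⟨fuel₁ - 1, by omega⟩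
    obtain ⟨f2, rfl⟩ : ∃ f, fuel₂ = f + 1 := ⟨fuel₂ - 1, by omega⟩
    rw [pvC_cons, pvC_cons]
    by_cases hv : PySem.Set.contains st.1 fol
    · rw [if_pos hv, if_pos hv]
      have hbr : pvBnd md ltf st.1 rest + 1 = pvBnd md ltf st.1 (fol :: rest) := by
        unfold pvBnd
        simp only [List.length_cons]
        omega
      exact ihn (n-1) (by omega) rest st g f1 f2
        (fun x hx => hstk x (List.mem_cons_of_mem _ hx)) (by omega) (by omega) (by omega)
    · rw [if_neg hv, if_neg hv]
      have hv' : PySem.Set.contains st.1 fol = false := pvNotTrue _ hv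
      have hmark := pvBnd_mark md ltf hU st.1 fol (hstk fol List.mem_cons_self) hv' rest
      refine ihn (n-1) (by omega) (pvNbrs md ltf fol ++ rest)
        (PySem.Set.add st.1 fol, PySem.Dict.insert st.2 fol g) g f1 f2 ?_ ?_ (by omega) (by omega)
      · intro x hx
        rcases List.mem_append.1 hx with h | h
        · exact pvNbrs_sub md ltf hltf fol x h
        · exact hstk x (List.mem_cons_of_mem _ h)
      · show pvBnd md ltf (PySem.Set.add st.1 fol) (pvNbrs md ltf fol ++ rest) ≤ n - 1
        omega

lemma pvC_eq_RUN (md : PySem.Dict String (List (String × Int)))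
    (ltf : PySem.Dict String (List String))
    (hltf : ∀ l x, x ∈ PySem.Dict.getD ltf l [] → x ∈ md.keys) (hU : md.keys.Nodup)
    (fuel : Nat) (g : Int) (stack : List String) (st : PvSt)
    (hstk : ∀ x ∈ stack, x ∈ md.keys) (h : pvBnd md ltf st.1 stack ≤ fuel) :
    pvC md ltf fuel g stack st = pvRUN md ltf g stack st :=
  pvC_suff md ltf hltf hU (pvBnd md ltf st.1 stack) stack st g fuel _ hstk le_rfl h le_rfl

-- the bridge: one worklist element is one recursive dfs call (combined state)
lemma pvBridge (md : PySem.Dict String (List (String × Int)))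
    (ltf : PySem.Dict String (List String))
    (hltf : ∀ l x, x ∈ PySem.Dict.getD ltf l [] → x ∈ md.keys) (hU : md.keys.Nodup)
    (hset : ∀ l, PySem.Dict.getD ltf l [] =
      PySem.Dict.getD (pvLtfA md) l []) :
    ∀ (n : Nat) (st : PvSt) (g : Int) (fol : String) (rest : List String),
      fol ∈ md.keys → (∀ x ∈ rest, x ∈ md.keys) → pvM md.keys st.1 ≤ n →
      pvRUN md ltf g (fol :: rest) st =
        pvRUN md ltf g rest (pvDFS md (pvLtfA md) g fol st) := by
  intro n
  induction n using Nat.strong_induction_on with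
  | _ n ihn =>
  intro st g fol rest hfol hrest hm
  have hnbrs : ∀ f, pvNbrs md ltf f = (PySem.Dict.getD md f []).flatMap (fun p =>
      (PySem.Dict.getD (pvLtfA md) p.1 []).filter (fun cf => cf ≠ f)) := by
    intro f
    unfold pvNbrs
    congr 1
    funext p
    rw [hset p.1]
  have hge1 : 1 ≤ pvBnd md ltf st.1 (fol :: rest) := by
    unfold pvBnd
    simp only [List.length_cons]
    omega
  by_cases hv : PySem.Set.contains st.1 fol
  · have hdfs : pvDFS md (pvLtfA md) g fol st = st := by
      unfold pvDFS
      rw [pvDfsA_succ, if_pos hv]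
    rw [hdfs]
    unfold pvRUN
    obtain ⟨b, hb⟩ : ∃ b, pvBnd md ltf st.1 (fol :: rest) = b + 1 :=
      ⟨pvBnd md ltf st.1 (fol :: rest) - 1, by omega⟩
    rw [hb, pvC_cons, if_pos hv]
    have hbr : pvBnd md ltf st.1 rest + 1 = pvBnd md ltf st.1 (fol :: rest) := by
      unfold pvBnd
      simp only [List.length_cons]
      omega
    exact pvC_suff md ltf hltf hU (pvBnd md ltf st.1 rest) rest st g b _
      hrest le_rfl (by omega) le_rfl
  · have hv' : PySem.Set.contains st.1 fol = false := pvNotTrue _ hv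
    have hlt : pvM md.keys (PySem.Set.add st.1 fol) < pvM md.keys st.1 :=
      pvM_lt md.keys st.1 fol hfol hv'
    have hn1 : 1 ≤ n := by omega
    have hmark := pvBnd_mark md ltf hU st.1 fol hfol hv' rest
    -- LHS: pop fol, prepend its neighbours
    have hL : pvRUN md ltf g (fol :: rest) st =
        pvRUN md ltf g (pvNbrs md ltf fol ++ rest)
          (PySem.Set.add st.1 fol, PySem.Dict.insert st.2 fol g) := by
      unfold pvRUN
      obtain ⟨b, hb⟩ : ∃ b, pvBnd md ltf st.1 (fol :: rest) = b + 1 :=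
        ⟨pvBnd md ltf st.1 (fol :: rest) - 1, by omega⟩
      rw [hb, pvC_cons, if_neg hv]
      refine pvC_suff md ltf hltf hU
        (pvBnd md ltf (PySem.Set.add st.1 fol) (pvNbrs md ltf fol ++ rest))
        (pvNbrs md ltf fol ++ rest)
        (PySem.Set.add st.1 fol, PySem.Dict.insert st.2 fol g) g b _ ?_ le_rfl (by omega) le_rfl
      intro x hx
      rcases List.mem_append.1 hx with h | h
      · exact pvNbrs_sub md ltf hltf fol x h
      · exact hrest x h
    -- RHS: the dfs unfolds to the fold over the neighbours
    have hDFSu : pvDFS md (pvLtfA md) g fol st =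
        (pvNbrs md ltf fol).foldl (fun s cf => pvDfsA md (pvLtfA md) (pvM md.keys st.1) g cf s)
          (PySem.Set.add st.1 fol, PySem.Dict.insert st.2 fol g) := by
      unfold pvDFS
      rw [pvDfsA_succ, if_neg hv, hnbrs]
    have hltfA : ∀ l x, x ∈ PySem.Dict.getD (pvLtfA md) l [] → x ∈ md.keys :=
      pvLtfA_val_mem md
    -- replace the fixed-fuel dfs by the canonical one along the fold
    have hF : ∀ (l : List String), (∀ x ∈ l, x ∈ md.keys) → ∀ st' : PvSt,
        pvM md.keys st'.1 < pvM md.keys st.1 →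
        l.foldl (fun s cf => pvDfsA md (pvLtfA md) (pvM md.keys st.1) g cf s) st' =
          l.foldl (fun s cf => pvDFS md (pvLtfA md) g cf s) st' := by
      intro l
      induction l with
      | nil => intro _ _ _; rfl
      | cons c cs ihl =>
        intro hl st' hlt'
        simp only [List.foldl_cons]
        rw [pvDfsA_eq_DFS md (pvLtfA md) hltfA _ g c st' (hl c List.mem_cons_self) hlt']
        apply ihl (fun x hx => hl x (List.mem_cons_of_mem _ hx))
        obtain ⟨ex, hex, _⟩ := pvDfsA_mono md (pvLtfA md) hltfA (pvM md.keys st'.1 + 1) g c st'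
          (hl c List.mem_cons_self)
        calc pvM md.keys (pvDFS md (pvLtfA md) g c st').1
            = pvM md.keys (st'.1 ++ ex) := by rw [pvDFS, hex]
          _ ≤ pvM md.keys st'.1 := pvM_append _ _ _
          _ < pvM md.keys st.1 := hlt'
    -- the generalized bridge for a block of prepended neighbours
    have hG : ∀ (l : List String), (∀ x ∈ l, x ∈ md.keys) → ∀ st' : PvSt,
        pvM md.keys st'.1 ≤ n - 1 →
        pvRUN md ltf g (l ++ rest) st' =
          pvRUN md ltf g rest (l.foldl (fun s cf => pvDFS md (pvLtfA md) g cf s) st') := by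
      intro l
      induction l with
      | nil => intro _ st' _; rfl
      | cons c cs ihl =>
        intro hl st' hm'
        rw [List.cons_append]
        rw [ihn (n-1) (by omega) st' g c (cs ++ rest) (hl c List.mem_cons_self)
          (fun x hx => by
            rcases List.mem_append.1 hx with h | h
            · exact hl x (List.mem_cons_of_mem _ h)
            · exact hrest x h) hm']
        have hmono : pvM md.keys (pvDFS md (pvLtfA md) g c st').1 ≤ n - 1 := by
          obtain ⟨ex, hex, _⟩ := pvDfsA_mono md (pvLtfA md) hltfA (pvM md.keys st'.1 + 1) g c st'
            (hl c List.mem_cons_self)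
          calc pvM md.keys (pvDFS md (pvLtfA md) g c st').1
              = pvM md.keys (st'.1 ++ ex) := by rw [pvDFS, hex]
            _ ≤ pvM md.keys st'.1 := pvM_append _ _ _
            _ ≤ n - 1 := hm'
        rw [ihl (fun x hx => hl x (List.mem_cons_of_mem _ hx)) (pvDFS md (pvLtfA md) g c st') hmono]
        simp only [List.foldl_cons]
    have hm1 : pvM md.keys (PySem.Set.add st.1 fol) ≤ n - 1 := by omega
    rw [hL, hG (pvNbrs md ltf fol) (pvNbrs_sub md ltf hltf fol)
        (PySem.Set.add st.1 fol, PySem.Dict.insert st.2 fol g) hm1,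
      hDFSu, hF (pvNbrs md ltf fol) (pvNbrs_sub md ltf hltf fol)
        (PySem.Set.add st.1 fol, PySem.Dict.insert st.2 fol g) hlt]

lemma pvKeysLen (md : PySem.Dict String (List (String × Int))) :
    md.keys.length = PySem.Dict.size md := by
  simp [PySem.Dict.keys, PySem.Dict.size]

-- the fuel written into port B dominates the loop bound
lemma pvFuelB_ok (md : PySem.Dict String (List (String × Int))) (hU : md.keys.Nodup)
    (vis : List String) (start : String) :
    pvBnd md (pvLtfA md) vis [start] ≤ pvFuel md := by
  unfold pvFuel
  have hval : ∀ l, (PySem.Dict.getD (pvLtfA md) l []).length ≤ PySem.Dict.size md := by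
    intro l
    have hnd := pvLtfA_val_nodup md l
    have hsub : ∀ x ∈ PySem.Dict.getD (pvLtfA md) l [], x ∈ md.keys := pvLtfA_val_mem md l
    calc (PySem.Dict.getD (pvLtfA md) l []).length
        = (PySem.Dict.getD (pvLtfA md) l []).toFinset.card :=
          (List.toFinset_card_of_nodup hnd).symm
      _ ≤ md.keys.toFinset.card := by
          apply Finset.card_le_card
          intro x hx
          rw [List.mem_toFinset] at hx ⊢
          exact hsub x hx
      _ ≤ md.keys.length := List.toFinset_card_le _
      _ = PySem.Dict.size md := pvKeysLen md
  have hconst : ∀ (l : List (String × Int)) (c : Nat), (l.map (fun _ => c)).sum = l.length * c := by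
    intro l c
    induction l with
    | nil => simp
    | cons x xs _ => simp [Nat.succ_mul]; omega
  have hdeg : ∀ k, (pvNbrs md (pvLtfA md) k).length ≤
      (PySem.Dict.getD md k []).length * PySem.Dict.size md := by
    intro k
    unfold pvNbrs
    rw [List.length_flatMap]
    calc ((PySem.Dict.getD md k []).map (fun p =>
            ((PySem.Dict.getD (pvLtfA md) p.1 []).filter (fun cf => decide (cf ≠ k))).length)).sum
        ≤ ((PySem.Dict.getD md k []).map (fun _ => PySem.Dict.size md)).sum := by
          apply List.sum_le_sum
          intro p _
          exact le_trans (List.length_filter_le _ _) (hval p.1)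
      _ = (PySem.Dict.getD md k []).length * PySem.Dict.size md := hconst _ _
  rw [PySem.List.foldl_add_nat md.items (fun p => p.2.length * PySem.Dict.size md) 0]
  have hitems : (md.items.map (fun p => p.2.length * PySem.Dict.size md)).sum =
      (md.keys.map (fun k => (PySem.Dict.getD md k []).length * PySem.Dict.size md)).sum := by
    rw [PySem.Dict.items_eq_map_keys md hU [], List.map_map]
    rfl
  have hsum2 : ∀ L : List String,
      (L.map (fun k => 1 + (pvNbrs md (pvLtfA md) k).length)).sum ≤
        L.length + (L.map (fun k =>
          (PySem.Dict.getD md k []).length * PySem.Dict.size md)).sum := by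
    intro L
    induction L with
    | nil => simp
    | cons a as ihk =>
      simp only [List.map_cons, List.sum_cons, List.length_cons]
      have := hdeg a
      omega
  have hsum1 : ((md.keys.filter (fun k => !vis.contains k)).map
      (fun k => 1 + (pvNbrs md (pvLtfA md) k).length)).sum ≤
      (md.keys.map (fun k => 1 + (pvNbrs md (pvLtfA md) k).length)).sum :=
    List.Sublist.sum_le_sum (List.filter_sublist.map (fun k => 1 + (pvNbrs md (pvLtfA md) k).length)) (fun a _ => Nat.zero_le a)
  have h2 := hsum2 md.keys
  have hkl := pvKeysLen md
  unfold pvBnd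
  simp only [List.length_cons, List.length_nil]
  omega

-- B's dict-only loop is the second component of the combined loop, and the invariant
-- (groups-dict membership = visited-set membership) is preserved
lemma pvLoopB_eq_C (md : PySem.Dict String (List (String × Int)))
    (ltf : PySem.Dict String (List String)) :
    ∀ (fuel : Nat) (g : Int) (stack : List String) (st : PvSt), pvInv st →
      pvLoopB md ltf fuel g stack st.2 = (pvC md ltf fuel g stack st).2 ∧
        pvInv (pvC md ltf fuel g stack st) := by
  intro fuel
  induction fuel with
  | zero =>
    intro g stack st hinv
    cases stack <;> exact ⟨rfl, hinv⟩
  | succ n ih =>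
    intro g stack st hinv
    cases stack with
    | nil => exact ⟨rfl, hinv⟩
    | cons fol rest =>
      rw [pvC_cons]
      show pvLoopB md ltf (n+1) g (fol :: rest) st.2 = _ ∧ _
      simp only [pvLoopB]
      rw [hinv fol]
      by_cases hv : PySem.Set.contains st.1 fol
      · rw [if_pos hv, if_pos hv]
        exact ih g rest st hinv
      · rw [if_neg hv, if_neg hv]
        have hinv' : pvInv (PySem.Set.add st.1 fol, PySem.Dict.insert st.2 fol g) := by
          intro x
          show PySem.Dict.contains (PySem.Dict.insert st.2 fol g) x = _
          rw [PySem.Dict.contains_insert, pvContainsAdd, hinv x]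
        have hnb : (PySem.Dict.getD md fol []).flatMap (fun q =>
            (PySem.Dict.getD ltf q.1 []).filter (fun cf => cf ≠ fol)) = pvNbrs md ltf fol := rfl
        rw [hnb]
        exact ih g (pvNbrs md ltf fol ++ rest)
          (PySem.Set.add st.1 fol, PySem.Dict.insert st.2 fol g) hinv'

-- a full single-start run of the combined loop is A's recursive dfs call
lemma pvStart (md : PySem.Dict String (List (String × Int))) (hU : md.keys.Nodup)
    (ltf : PySem.Dict String (List String))
    (hset : ∀ l, PySem.Dict.getD ltf l [] = PySem.Dict.getD (pvLtfA md) l [])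
    (g : Int) (fol : String) (hfol : fol ∈ md.keys) (st : PvSt) :
    pvC md ltf (pvFuel md) g [fol] st =
      pvDfsA md (pvLtfA md) (PySem.Dict.size md + 1) g fol st := by
  have hltfA : ∀ l x, x ∈ PySem.Dict.getD (pvLtfA md) l [] → x ∈ md.keys :=
    pvLtfA_val_mem md
  have hltf : ∀ l x, x ∈ PySem.Dict.getD ltf l [] → x ∈ md.keys := by
    intro l x hx
    rw [hset l] at hx
    exact hltfA l x hx
  have hb : pvBnd md ltf st.1 [fol] ≤ pvFuel md := by
    have hnb : ∀ k, pvNbrs md ltf k = pvNbrs md (pvLtfA md) k := by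
      intro k
      unfold pvNbrs
      congr 1
      funext p
      rw [hset p.1]
    have heq : pvBnd md ltf st.1 [fol] = pvBnd md (pvLtfA md) st.1 [fol] := by
      unfold pvBnd
      simp only [hnb]
    rw [heq]
    exact pvFuelB_ok md hU st.1 fol
  rw [pvC_eq_RUN md ltf hltf hU _ g [fol] st
    (fun x hx => by rw [List.mem_singleton.1 hx]; exact hfol) hb]
  rw [pvBridge md ltf hltf hU hset (pvM md.keys st.1) st g fol []
    hfol (by intro x hx; cases hx) le_rfl]
  have hnil : pvRUN md ltf g [] (pvDFS md (pvLtfA md) g fol st) =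
      pvDFS md (pvLtfA md) g fol st := by
    unfold pvRUN
    exact pvC_nil _ _ _ _ _
  rw [hnil]
  rw [pvDfsA_eq_DFS md (pvLtfA md) hltfA (PySem.Dict.size md + 1) g fol st hfol
    (by have h1 := pvM_le_len md.keys st.1
        have h2 := pvKeysLen md
        omega)]

-- the two outer loops over the keys march in lockstep
lemma pvOuter (md : PySem.Dict String (List (String × Int))) (hU : md.keys.Nodup) :
    ∀ (L : List String), (∀ x ∈ L, x ∈ md.keys) → ∀ (stA : PvSt) (g : Int), pvInv stA →
      L.foldl (fun (acc : PySem.Dict String Int × Int) start =>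
          if PySem.Dict.contains acc.1 start then acc
          else (pvLoopB md (pvLtfB md) (pvFuel md) acc.2 [start] acc.1, acc.2 + 1))
        (stA.2, g) =
      ((L.foldl (fun (st : PvSt × Int) fol =>
          if PySem.Set.contains st.1.1 fol then st
          else (pvDfsA md (pvLtfA md) (PySem.Dict.size md + 1) st.2 fol st.1, st.2 + 1))
        (stA, g)).1.2,
       (L.foldl (fun (st : PvSt × Int) fol =>
          if PySem.Set.contains st.1.1 fol then st
          else (pvDfsA md (pvLtfA md) (PySem.Dict.size md + 1) st.2 fol st.1, st.2 + 1))
        (stA, g)).2) ∧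
      pvInv (L.foldl (fun (st : PvSt × Int) fol =>
          if PySem.Set.contains st.1.1 fol then st
          else (pvDfsA md (pvLtfA md) (PySem.Dict.size md + 1) st.2 fol st.1, st.2 + 1))
        (stA, g)).1 := by
  intro L
  induction L with
  | nil => intro _ stA g hinv; exact ⟨rfl, hinv⟩
  | cons fol rest ih =>
    intro hL stA g hinv
    have hfol : fol ∈ md.keys := hL fol List.mem_cons_self
    simp only [List.foldl_cons]
    rw [hinv fol]
    by_cases hv : PySem.Set.contains stA.1 fol
    · rw [if_pos hv, if_pos hv]
      exact ih (fun x hx => hL x (List.mem_cons_of_mem _ hx)) stA g hinv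
    · rw [if_neg hv, if_neg hv]
      obtain ⟨heq, hinv'⟩ :=
        pvLoopB_eq_C md (pvLtfB md) (pvFuel md) g [fol] stA hinv
      rw [heq, pvStart md hU (pvLtfB md) (pvLtfB_eq md) g fol hfol stA] at *
      exact ih (fun x hx => hL x (List.mem_cons_of_mem _ hx))
        (pvDfsA md (pvLtfA md) (PySem.Dict.size md + 1) g fol stA) (g + 1) hinv'

-- ===== VERDICT (by name: the statement is the Claim_ definition above) =====
theorem build_groups_from_mapping_spec : Claim_equal_build_groups_from_mapping := by
  unfold Claim_equal_build_groups_from_mapping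
  intro mapping _
  unfold Spec_build_groups_from_mapping
  unfold build_groups_from_mapping build_groups_from_mapping_alt
  simp only []
  have hU : (PySem.Dict.ofList mapping).keys.Nodup := PySem.Dict.nodup_keys_ofList mapping
  set md := PySem.Dict.ofList mapping with hmd
  have hinv0 : pvInv ((PySem.Set.empty, PySem.Dict.empty) : PvSt) := by
    intro x
    show PySem.Dict.contains (PySem.Dict.empty : PySem.Dict String Int) x =
      PySem.Set.contains ([] : PySem.Set String) x
    rw [PySem.Dict.contains_empty]
    rfl
  obtain ⟨heq, _⟩ := pvOuter md hU md.keys (fun x hx => hx)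
    ((PySem.Set.empty, PySem.Dict.empty) : PvSt) 0 hinv0
  show (md.keys.foldl (fun (st : PvSt × Int) fol =>
      if PySem.Set.contains st.1.1 fol then st
      else (pvDfsA md (pvLtfA md) (PySem.Dict.size md + 1) st.2 fol st.1, st.2 + 1))
    ((PySem.Set.empty, PySem.Dict.empty), 0)).1.2.items =
    (md.keys.foldl (fun (acc : PySem.Dict String Int × Int) start =>
      if PySem.Dict.contains acc.1 start then acc
      else (pvLoopB md (pvLtfB md) (pvFuel md) acc.2 [start] acc.1, acc.2 + 1))
    ((((PySem.Set.empty, PySem.Dict.empty) : PvSt)).2, (0 : Int))).1.items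
  rw [heq]
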